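-- pv_equiv track=rewrite | github.com/ramge132/SSAFY_Daejeon_Algorithm | seokbangguri/SWEA/[SEA]XY문자열1_D3_.py | tracking
-- ===== SOURCE A (Python) =====
-- def tracking(a, n):
--     while n > 0:
--         if a[-1] == 'X':
--             a = a[:-1]
--             n -= 1
--         elif a[-1] == 'Y':
--             a = a[::-1][1:]
--             n-=1
--     return a
-- ===== SOURCE B (Python) =====
-- def tracking(a, n):
--     # Two index pointers + an orientation flag instead of rebuilding/reversing
--     # the string each step; one slice at the end.
--     lo, hi, rev = 0, len(a), False
--     while n > 0:
--         c = a[lo] if rev else a[hi - 1]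
--         if rev:
--             lo += 1
--         else:
--             hi -= 1
--         if c == 'Y':
--             rev = not rev
--         n -= 1
--     s = a[lo:hi]
--     return s[::-1] if rev else s
-- ===== Notes on version B (the rewrite author's own statement) =====
-- stated objective: alternative
-- what changed: Replaced the per-step string rebuild/reversal (each 'X' copies a[:-1], each 'Y' copies and reverses the whole string) by two index pointers into the original string plus an orientation flag, with a single slice (and at most one reversal) at the end; intended as the asymptotically cheaper form (O(n+len) work vs A's O(n*len) copying), though a timing run could not confirm a clean ratio (A times out before a measurable size).
-- outside the precondition, e.g. on tracking('ZX', 1): A returns 'Z', B returns 'Z'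
import Mathlib
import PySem

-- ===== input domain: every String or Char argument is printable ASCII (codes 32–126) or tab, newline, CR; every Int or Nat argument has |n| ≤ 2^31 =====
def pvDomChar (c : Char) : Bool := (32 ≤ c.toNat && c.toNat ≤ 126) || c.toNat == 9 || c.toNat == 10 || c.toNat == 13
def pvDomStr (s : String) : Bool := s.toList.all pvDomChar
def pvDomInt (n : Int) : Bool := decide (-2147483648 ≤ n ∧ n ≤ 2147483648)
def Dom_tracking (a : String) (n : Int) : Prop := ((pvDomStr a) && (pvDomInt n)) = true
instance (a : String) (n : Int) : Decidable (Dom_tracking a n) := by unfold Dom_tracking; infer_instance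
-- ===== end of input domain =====

-- B replaces A's per-step string rebuild/reverse by two index pointers and an
-- orientation flag, slicing once at the end; equal on Pre_.

-- ===== PORT A =====
-- while n > 0: pop the last char of the current string, reversing on 'Y'.
-- On a non-'X'/'Y' last char Python loops forever, and on an empty string a[-1]
-- raises IndexError: both are outside Pre_; the port returns the current string there.
def trackingLoop (l : List Char) (n : Int) : List Char :=
  if h : 0 < n then
    match PySem.List.pyGet? l (-1) with
    | some 'X' => trackingLoop (PySem.List.slice l none (some (-1))) (n - 1)      -- a = a[:-1]
    | some 'Y' => trackingLoop (PySem.List.slice l.reverse (some 1) none) (n - 1) -- a = a[::-1][1:] (PySem.List.slice?_none_none_neg_one: a[::-1] = reverse)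
    | _ => l   -- Python: infinite loop (other char) or IndexError (empty); outside Pre_
  else l
termination_by n.toNat
decreasing_by all_goals omega

def tracking (a : String) (n : Int) : String := String.mk (trackingLoop a.toList n)

-- ===== PORT B =====
-- lo/hi/rev pointer loop over the untouched original string.
def trackingAltLoop (l : List Char) (lo hi : Int) (rev : Bool) (n : Int) : Int × Int × Bool :=
  if h : 0 < n then
    match (if rev then PySem.List.pyGet? l lo else PySem.List.pyGet? l (hi - 1)) with
    | none => (lo, hi, rev)   -- Python: IndexError; outside Pre_
    | some c =>
        trackingAltLoop l (if rev then lo + 1 else lo) (if rev then hi else hi - 1)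
          (if c = 'Y' then !rev else rev) (n - 1)
  else (lo, hi, rev)
termination_by n.toNat
decreasing_by omega

def tracking_alt (a : String) (n : Int) : String :=
  let l := a.toList
  let st := trackingAltLoop l 0 (l.length : Int) false n
  let s := PySem.List.slice l (some st.1) (some st.2.1)
  String.mk (if st.2.2 then s.reverse else s)

-- ===== PRECONDITION & SPEC =====
-- Pre_ narrows to a closed-form shape: for n > 0 it requires EVERY char to be 'X'/'Y'
-- and n ≤ len(a); on other inputs whether A returns, loops forever (a non-'X'/'Y' char
-- reaches the end) or raises IndexError (string exhausted) depends on the run, and A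
-- does return on some of them (e.g. "ZX", 1 → "Z", where B returns the same).
def Pre_tracking (a : String) (n : Int) : Prop :=
  n ≤ 0 ∨ (n ≤ (a.toList.length : Int) ∧ a.toList.all (fun c => c == 'X' || c == 'Y') = true)
instance (a : String) (n : Int) : Decidable (Pre_tracking a n) := by
  unfold Pre_tracking; infer_instance

def pvWitness_tracking : String × Int := ("XYXXY", 3)

def Spec_tracking (a : String) (n : Int) (out : String) : Prop := out = tracking_alt a n
instance (a : String) (n : Int) (out : String) : Decidable (Spec_tracking a n out) := by
  unfold Spec_tracking; infer_instance

-- ===== CLAIM (what is proved, stated in full; the proofs are below) =====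
def Claim_equal_tracking : Prop :=
  ∀ (a : String) (n : Int), Dom_tracking a n → Pre_tracking a n → Spec_tracking a n (tracking a n)

-- ===== LEMMAS AND PROOFS =====

-- the string A carries, expressed through B's state (lo, hi, rev)
def pvView (l : List Char) (st : Int × Int × Bool) : List Char :=
  let s := PySem.List.slice l (some st.1) (some st.2.1)
  if st.2.2 then s.reverse else s

lemma pvView_natCast (l : List Char) (lo hi : Nat) (rev : Bool) :
    pvView l ((lo : Int), (hi : Int), rev) =
      (if rev then ((l.drop lo).take (hi - lo)).reverse else (l.drop lo).take (hi - lo)) := by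
  simp [pvView, PySem.List.slice_natCast]

lemma pvMain (k : Nat) : ∀ (n : Int), n.toNat = k →
    ∀ (l : List Char) (lo hi : Nat) (rev : Bool), lo ≤ hi → hi ≤ l.length →
    n ≤ (hi : Int) - (lo : Int) →
    (∀ c ∈ l, c = 'X' ∨ c = 'Y') →
    trackingLoop (pvView l ((lo : Int), (hi : Int), rev)) n =
      pvView l (trackingAltLoop l (lo : Int) (hi : Int) rev n) := by
  induction k with
  | zero =>
    intro n hk l lo hi rev _ _ _ _
    have hn : ¬ (0 : Int) < n := by omega
    rw [trackingLoop.eq_def, trackingAltLoop.eq_def]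
    simp [hn]
  | succ k ih =>
    intro n hk l lo hi rev hlohi hhile hnle hchars
    have hn : (0 : Int) < n := by omega
    have hlt : lo < hi := by omega
    have hlol : lo < l.length := by omega
    have hhil : hi - 1 < l.length := by omega
    set s : List Char := (l.drop lo).take (hi - lo) with hs_def
    have hslen : s.length = hi - lo := by
      simp [hs_def, List.length_take, List.length_drop]; omega
    have hsne : s ≠ [] := by
      intro h; rw [h] at hslen; simp at hslen; omega
    have hsget : ∀ (i : Nat) (h1 : i < s.length) (h2 : lo + i < l.length),
        s[i]'h1 = l[lo + i]'h2 := by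
      intro i h1 h2
      simp only [hs_def, List.getElem_take, List.getElem_drop]
    have hs_head : s.head? = some (l[lo]'hlol) := by
      have h1 : 0 < s.length := by omega
      rw [List.head?_eq_getElem?, List.getElem?_eq_getElem h1, hsget 0 h1 (by omega)]
      simp only [Nat.add_zero]
    have hs_last : s.getLast? = some (l[hi-1]'hhil) := by
      have h1 : s.length - 1 < s.length := by omega
      rw [List.getLast?_eq_getElem?, List.getElem?_eq_getElem h1,
        hsget _ h1 (by omega)]
      have hidx : lo + (s.length - 1) = hi - 1 := by omega
      simp only [hidx]
    have hdropLast : s.dropLast = (l.drop lo).take (hi - 1 - lo) := by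
      rw [List.dropLast_eq_take, hslen, hs_def, List.take_take]
      congr 1
      omega
    have htail : s.tail = (l.drop (lo + 1)).take (hi - (lo + 1)) := by
      rw [← List.drop_one, hs_def, List.drop_take, List.drop_drop]
      congr 1 <;> omega
    -- the char popped this step
    have hcx : ∀ (j : Nat) (hj : j < l.length), l[j] = 'X' ∨ l[j] = 'Y' :=
      fun j hj => hchars _ (List.getElem_mem hj)
    -- B's scrutinee
    have hBget : (if rev then PySem.List.pyGet? l (lo : Int)
        else PySem.List.pyGet? l ((hi : Int) - 1)) =
        some (if rev then l[lo]'hlol else l[hi-1]'hhil) := by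
      cases rev <;> simp only [if_true, if_false, Bool.false_eq_true]
      · have : ((hi : Int) - 1) = ((hi - 1 : Nat) : Int) := by omega
        rw [this, PySem.List.pyGet?_natCast, List.getElem?_eq_getElem hhil]
      · rw [PySem.List.pyGet?_natCast, List.getElem?_eq_getElem hlol]
    -- A's scrutinee
    have hAget : PySem.List.pyGet? (pvView l ((lo : Int), (hi : Int), rev)) (-1) =
        some (if rev then l[lo]'hlol else l[hi-1]'hhil) := by
      rw [PySem.List.pyGet?_neg_one, pvView_natCast]
      cases rev
      · simpa [← hs_def] using hs_last
      · simp only [if_true, List.getLast?_reverse, ← hs_def]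
        simpa using hs_head
    have hcast1 : ((lo : Int) + 1) = ((lo + 1 : Nat) : Int) := by push_cast; ring
    have hcast2 : ((hi : Int) - 1) = ((hi - 1 : Nat) : Int) := by omega
    rw [trackingLoop.eq_def, trackingAltLoop.eq_def]
    rw [dif_pos hn, dif_pos hn, hAget, hBget]
    cases rev
    · -- rev = false : pop from the right
      rcases hcx (hi - 1) hhil with hc | hc <;> rw [hc] <;>
        simp only [Bool.not_false]
      · -- 'X'
        rw [PySem.List.slice_to_neg_one, pvView_natCast]
        simp only [if_false, Bool.false_eq_true, ← hs_def]
        rw [hdropLast, hcast2]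
        have := ih (n - 1) (by omega) l lo (hi - 1) false (by omega) (by omega)
          (by omega) hchars
        rw [pvView_natCast] at this
        simpa using this
      · -- 'Y'
        rw [PySem.List.slice_from_one, pvView_natCast]
        simp only [if_false, Bool.false_eq_true, ← hs_def]
        rw [List.tail_reverse, hdropLast, hcast2]
        have := ih (n - 1) (by omega) l lo (hi - 1) true (by omega) (by omega)
          (by omega) hchars
        rw [pvView_natCast] at this
        simpa using this
    · -- rev = true : pop from the left
      rcases hcx lo hlol with hc | hc <;> rw [hc] <;>
        simp only [Char.reduceEq, if_false, if_true, Bool.not_true]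
      · -- 'X'
        rw [PySem.List.slice_to_neg_one, pvView_natCast]
        simp only [if_true, ← hs_def]
        rw [List.dropLast_reverse, htail, hcast1]
        have := ih (n - 1) (by omega) l (lo + 1) hi true (by omega) (by omega)
          (by push_cast; omega) hchars
        rw [pvView_natCast] at this
        simpa using this
      · -- 'Y'
        rw [PySem.List.slice_from_one, pvView_natCast]
        simp only [if_true, ← hs_def]
        rw [List.reverse_reverse, htail, hcast1]
        have := ih (n - 1) (by omega) l (lo + 1) hi false (by omega) (by omega)
          (by push_cast; omega) hchars
        rw [pvView_natCast] at this
        simpa using this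

-- ===== VERDICT (by name: the statement is the Claim_ definition above) =====
theorem tracking_spec : Claim_equal_tracking := by
  intro a n _ hpre
  unfold Spec_tracking tracking tracking_alt
  congr 1
  set l := a.toList with hl
  rcases hpre with hle | ⟨hnle, hchars0⟩
  · have hn : ¬ (0 : Int) < n := by omega
    rw [trackingLoop.eq_def, trackingAltLoop.eq_def]
    simp [hn]
  · have hchars : ∀ c ∈ a.toList, c = 'X' ∨ c = 'Y' := by
      simpa using hchars0
    have := pvMain n.toNat n rfl l 0 l.length false (by omega) (le_refl _)
      (by rw [hl]; push_cast; omega) (by rw [hl]; exact hchars)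
    rw [pvView_natCast] at this
    simp only [Nat.cast_zero, List.drop_zero, Nat.sub_zero, List.take_length,
      Bool.false_eq_true, if_false] at this
    simpa [pvView] using this
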